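-- pv_equiv track=rewrite | github.com/Killerbee321/Validation | CommonFunctions.py | admin_update_data_source_add_secfilter
-- ===== SOURCE A (Python) =====
-- ADMIN_SEC_FILTER_TEMPLATE = '\r\n        &lt;SecFilter&gt;\r\n          &lt;Type&gt;0&lt;/Type&gt;\r\n          &lt;SessionVariable&gt;LN_etl_Hidden&lt;/SessionVariable&gt;\r\n          &lt;Enabled&gt;true&lt;/Enabled&gt;\r\n        &lt;/SecFilter&gt;'
--
-- STAGING_COLUMN_START = '&lt;StagingColumn&gt;'
--
-- STAGING_COLUMN_END = '&lt;/StagingColumn&gt;'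
--
-- def admin_update_data_source_add_secfilter(source_data, column_name):
--     new_data_source = ''
--     error = ''
--     remaining_source_data = source_data
--     element_found = False
--     # the security filter is added after the </TargetAggregations> element of the StagingColumn
--     xml_target_aggregations_end = '&lt;/TargetAggregations&gt;'
--     xml_name = '&lt;Name&gt;' + column_name.strip() + '&lt;/Name&gt;'
--
--     while STAGING_COLUMN_START in remaining_source_data:
--         prev_staging_column = remaining_source_data.partition(STAGING_COLUMN_START)[0]
--         staging_column_begin = remaining_source_data.partition(STAGING_COLUMN_START)[1] + \
--                                remaining_source_data.partition(STAGING_COLUMN_START)[2]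
--         staging_column = staging_column_begin.partition(STAGING_COLUMN_END)[0] + \
--                          staging_column_begin.partition(STAGING_COLUMN_END)[1]
--         remaining_source_data = staging_column_begin.partition(STAGING_COLUMN_END)[2]
--
--         if xml_name in staging_column:
--             element_found = True
--             staging_column_begin = staging_column.partition(xml_target_aggregations_end)[0] + \
--                                    staging_column.partition(xml_target_aggregations_end)[1]
--             staging_column_begin = staging_column_begin + ADMIN_SEC_FILTER_TEMPLATE
--             staging_column = staging_column_begin + staging_column.partition(xml_target_aggregations_end)[2]
--
--             new_data_source = new_data_source + prev_staging_column + staging_column + remaining_source_data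
--             remaining_source_data = ''
--         else:
--             new_data_source = new_data_source + prev_staging_column + staging_column
--
--     if not element_found:
--         error = 'admin_update_data_source_add_secfilter failed, reason: Column: ' + column_name.strip() + ',  has no element: /TargetAggregations'
--
--     return (new_data_source, error)
-- ===== SOURCE B (Python) =====
-- ADMIN_SEC_FILTER_TEMPLATE = '\r\n        &lt;SecFilter&gt;\r\n          &lt;Type&gt;0&lt;/Type&gt;\r\n          &lt;SessionVariable&gt;LN_etl_Hidden&lt;/SessionVariable&gt;\r\n          &lt;Enabled&gt;true&lt;/Enabled&gt;\r\n        &lt;/SecFilter&gt;'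
--
-- STAGING_COLUMN_START = '&lt;StagingColumn&gt;'
--
-- STAGING_COLUMN_END = '&lt;/StagingColumn&gt;'
--
--
-- def admin_update_data_source_add_secfilter(source_data, column_name):
--     # Index-based single scan: locate each StagingColumn block with str.find and,
--     # on a name match, insert the template with one slice of the original string.
--     xml_target_aggregations_end = '&lt;/TargetAggregations&gt;'
--     xml_name = '&lt;Name&gt;' + column_name.strip() + '&lt;/Name&gt;'
--     pos = 0  # index just past the last processed block (0 before any block)
--     while True:
--         i = source_data.find(STAGING_COLUMN_START, pos)
--         if i == -1:
--             error = ('admin_update_data_source_add_secfilter failed, reason: Column: '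
--                      + column_name.strip() + ',  has no element: /TargetAggregations')
--             return (source_data[:pos], error)
--         j = source_data.find(STAGING_COLUMN_END, i)
--         block_end = len(source_data) if j == -1 else j + len(STAGING_COLUMN_END)
--         block = source_data[i:block_end]
--         if xml_name in block:
--             k = block.find(xml_target_aggregations_end)
--             p = block_end if k == -1 else i + k + len(xml_target_aggregations_end)
--             return (source_data[:p] + ADMIN_SEC_FILTER_TEMPLATE + source_data[p:], '')
--         pos = block_end
-- ===== Notes on version B (the rewrite author's own statement) =====
-- stated objective: simpler
-- what changed: Instead of A's block-by-block rebuilding of the whole document via repeated str.partition and string concatenation, B scans the original string with index-based str.find, tracks only the end index of the last processed block, and on a match produces the result with a single slice-insert source[:p] + TEMPLATE + source[p:] (no-match returns source[:pos]).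
import Mathlib
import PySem

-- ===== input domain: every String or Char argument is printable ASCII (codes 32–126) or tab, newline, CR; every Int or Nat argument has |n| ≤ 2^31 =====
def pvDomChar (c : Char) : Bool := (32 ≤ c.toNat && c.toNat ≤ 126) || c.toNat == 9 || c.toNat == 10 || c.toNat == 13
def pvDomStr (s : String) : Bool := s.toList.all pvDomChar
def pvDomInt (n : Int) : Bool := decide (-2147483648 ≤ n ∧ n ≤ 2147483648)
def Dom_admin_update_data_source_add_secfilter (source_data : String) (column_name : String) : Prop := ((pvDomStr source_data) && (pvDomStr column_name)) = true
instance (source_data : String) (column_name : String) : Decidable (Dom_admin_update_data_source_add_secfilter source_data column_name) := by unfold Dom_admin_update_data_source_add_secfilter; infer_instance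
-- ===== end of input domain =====

-- B replaces A's block-by-block rebuilding of the document (repeated str.partition plus string
-- concatenation) by an index-based str.find scan over the original string with a single slice-insert.

-- Module constants of the Python file, shared by both ports (module-level constants in Python too).
def pvTemplate : List Char := "\r\n        &lt;SecFilter&gt;\r\n          &lt;Type&gt;0&lt;/Type&gt;\r\n          &lt;SessionVariable&gt;LN_etl_Hidden&lt;/SessionVariable&gt;\r\n          &lt;Enabled&gt;true&lt;/Enabled&gt;\r\n        &lt;/SecFilter&gt;".toList
def pvStartTag : List Char := "&lt;StagingColumn&gt;".toList
def pvEndTag : List Char := "&lt;/StagingColumn&gt;".toList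
def pvAggTag : List Char := "&lt;/TargetAggregations&gt;".toList
def pvXmlName (column_name : String) : List Char :=
  "&lt;Name&gt;".toList ++ PySem.Chars.strip column_name.toList ++ "&lt;/Name&gt;".toList
def pvErrMsg (column_name : String) : List Char :=
  "admin_update_data_source_add_secfilter failed, reason: Column: ".toList ++
    PySem.Chars.strip column_name.toList ++ ",  has no element: /TargetAggregations".toList

-- ===== PORT A =====
-- s.partition(sep): (head, sep, tail) at the first occurrence, (s, '', '') if absent
-- (every separator A partitions by is a nonempty constant, so Python never raises here).
def pvPartition (s sep : List Char) : List Char × List Char × List Char :=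
  let i := PySem.Chars.find s sep
  if i = -1 then (s, [], []) else (s.take i.toNat, sep, s.drop (i.toNat + sep.length))

-- not-found form
lemma pvPartition_of_not_infix (s sep : List Char) (h : ¬ sep <:+: s) :
    pvPartition s sep = (s, [], []) := by
  simp [pvPartition, PySem.Chars.find_eq_neg_one_iff, h]

-- found form
lemma pvPartition_of_infix (s sep : List Char) (h : sep <:+: s) :
    pvPartition s sep =
      (s.take (PySem.Chars.find s sep).toNat, sep,
        s.drop ((PySem.Chars.find s sep).toNat + sep.length)) := by
  have : PySem.Chars.find s sep ≠ -1 := (PySem.Chars.find_ne_neg_one_iff s sep).mpr h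
  simp [pvPartition, this]
lemma pv_find_add_le (s sep : List Char) (h : sep <:+: s) :
    (PySem.Chars.find s sep).toNat + sep.length ≤ s.length := by
  have h0 : 0 ≤ PySem.Chars.find s sep := (PySem.Chars.find_nonneg_iff s sep).mpr h
  have hp := (PySem.Chars.find_spec h0).1
  have := hp.length_le
  simp only [List.length_drop] at this
  have hle := PySem.Chars.find_le_length s sep
  omega
lemma pv_sep_append_drop (s sep : List Char) (h : sep <:+: s) :
    sep ++ s.drop ((PySem.Chars.find s sep).toNat + sep.length) =
      s.drop (PySem.Chars.find s sep).toNat := by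
  have h0 : 0 ≤ PySem.Chars.find s sep := (PySem.Chars.find_nonneg_iff s sep).mpr h
  have hp := (PySem.Chars.find_spec h0).1
  obtain ⟨t, ht⟩ := hp
  have ht2 : t = s.drop ((PySem.Chars.find s sep).toNat + sep.length) := by
    have := congrArg (List.drop sep.length) ht
    simpa [List.drop_drop, Nat.add_comm] using this
  rw [← ht2, ht]

-- beginc = s.drop (find)
lemma pv_begin_eq (s sep : List Char) (h : sep <:+: s) :
    (pvPartition s sep).2.1 ++ (pvPartition s sep).2.2 =
      s.drop (PySem.Chars.find s sep).toNat := by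
  rw [pvPartition_of_infix s sep h]
  exact pv_sep_append_drop s sep h

-- block = t.take (find + len) when found
lemma pvStartTag_pos : 0 < pvStartTag.length := by decide
lemma pvEndTag_pos : 0 < pvEndTag.length := by decide

-- termination fact cited by pvLoopA: the remaining data strictly shrinks each iteration
lemma pvLoopA_dec (rem : List Char) (h : PySem.Chars.isIn pvStartTag rem = true) :
    ((pvPartition ((pvPartition rem pvStartTag).2.1 ++ (pvPartition rem pvStartTag).2.2) pvEndTag).2.2).length < rem.length := by
  have hin : pvStartTag <:+: rem := (PySem.Chars.isIn_iff_infix _ _).mp h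
  have hb := pv_begin_eq rem pvStartTag hin
  have h1 := pv_find_add_le rem pvStartTag hin
  have hS := pvStartTag_pos
  rw [hb]
  set i := (PySem.Chars.find rem pvStartTag).toNat with hidef
  by_cases hE : pvEndTag <:+: rem.drop i
  · rw [pvPartition_of_infix _ _ hE]
    have h2 := pv_find_add_le _ pvEndTag hE
    have hEp := pvEndTag_pos
    simp only [List.length_drop] at *
    omega
  · rw [pvPartition_of_not_infix _ _ hE]
    simp only [List.length_nil]
    omega

def pvLoopA (xn : List Char) (acc rem : List Char) (found : Bool) : List Char × Bool :=
  if hin : PySem.Chars.isIn pvStartTag rem = true then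
    let prev := (pvPartition rem pvStartTag).1
    let beginc := (pvPartition rem pvStartTag).2.1 ++ (pvPartition rem pvStartTag).2.2
    let block := (pvPartition beginc pvEndTag).1 ++ (pvPartition beginc pvEndTag).2.1
    let rem2 := (pvPartition beginc pvEndTag).2.2
    if PySem.Chars.isIn xn block = true then
      let sb := (pvPartition block pvAggTag).1 ++ (pvPartition block pvAggTag).2.1 ++ pvTemplate
      (acc ++ prev ++ (sb ++ (pvPartition block pvAggTag).2.2) ++ rem2, true)
    else
      pvLoopA xn (acc ++ prev ++ block) rem2 found
  else (acc, found)
termination_by rem.length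
decreasing_by exact pvLoopA_dec rem hin

def admin_update_data_source_add_secfilter (source_data : String) (column_name : String) : String × String :=
  let r := pvLoopA (pvXmlName column_name) [] source_data.toList false
  (String.ofList r.1, String.ofList (if r.2 then [] else pvErrMsg column_name))

-- ===== PORT B =====
lemma pv_findFrom_facts (s sub : List Char) (pos : Nat)
    (h : PySem.Chars.findFrom s sub (pos : Int) none ≠ -1) :
    pos ≤ s.length ∧ (pos : Int) ≤ PySem.Chars.findFrom s sub (pos : Int) none ∧
      sub <+: s.drop (PySem.Chars.findFrom s sub (pos : Int) none).toNat := by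
  have hle : pos ≤ s.length := by
    by_contra hlen
    apply h
    simp only [PySem.Chars.findFrom]
    have h1 : ¬ ((pos : Int) < 0) := by omega
    have h2 : ((s.length : Int) < (pos : Int)) := by omega
    simp [h1, h2]
  have hs := PySem.Chars.findFrom_natCast_spec s sub pos hle h
  exact ⟨hle, hs.1, hs.2.1⟩

-- termination fact cited by pvLoopB: pos strictly advances towards the end of the string
lemma pvLoopB_dec (src : List Char) (pos : Nat)
    (hi : PySem.Chars.findFrom src pvStartTag (pos : Int) none ≠ -1) :
    src.length + 1 -
      (if PySem.Chars.findFrom src pvEndTag (PySem.Chars.findFrom src pvStartTag (pos : Int) none) none = -1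
        then src.length
        else (PySem.Chars.findFrom src pvEndTag (PySem.Chars.findFrom src pvStartTag (pos : Int) none) none).toNat + pvEndTag.length)
      < src.length + 1 - pos := by
  obtain ⟨hle, hge, hpre⟩ := pv_findFrom_facts src pvStartTag pos hi
  set i := PySem.Chars.findFrom src pvStartTag (pos : Int) none with hidef
  have hi0 : 0 ≤ i := le_trans (by omega) hge
  have hilen : i.toNat < src.length := by
    have := hpre.length_le
    simp only [List.length_drop] at this
    have := pvStartTag_pos
    omega
  have hposle : pos ≤ i.toNat := by omega
  have hcast : i = ((i.toNat : Nat) : Int) := (Int.toNat_of_nonneg hi0).symm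
  by_cases hj : PySem.Chars.findFrom src pvEndTag i none = -1
  · rw [if_pos hj]; omega
  · rw [if_neg hj]
    rw [hcast] at hj
    obtain ⟨_, hge2, hpre2⟩ := pv_findFrom_facts src pvEndTag i.toNat hj
    have := hpre2.length_le
    simp only [List.length_drop] at this
    have hEp := pvEndTag_pos
    rw [hcast]
    omega

def pvLoopB (src xn err : List Char) (pos : Nat) : List Char × List Char :=
  let i := PySem.Chars.findFrom src pvStartTag (pos : Int) none
  if hi : i = -1 then (PySem.List.slice src none (some (pos : Int)), err)
  else
    let j := PySem.Chars.findFrom src pvEndTag i none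
    let blockEnd : Nat := if j = -1 then src.length else j.toNat + pvEndTag.length
    let block := PySem.List.slice src (some i) (some (blockEnd : Int))
    if PySem.Chars.isIn xn block = true then
      let k := PySem.Chars.find block pvAggTag
      let p : Nat := if k = -1 then blockEnd else i.toNat + k.toNat + pvAggTag.length
      (PySem.List.slice src none (some (p : Int)) ++ pvTemplate ++ PySem.List.slice src (some (p : Int)) none, [])
    else pvLoopB src xn err blockEnd
termination_by src.length + 1 - pos
decreasing_by exact pvLoopB_dec src pos hi

def admin_update_data_source_add_secfilter_alt (source_data : String) (column_name : String) : String × String :=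
  let r := pvLoopB source_data.toList (pvXmlName column_name) (pvErrMsg column_name) 0
  (String.ofList r.1, String.ofList r.2)

-- ===== PRECONDITION & SPEC =====
def Spec_admin_update_data_source_add_secfilter (source_data : String) (column_name : String) (out : String × String) : Prop := out = admin_update_data_source_add_secfilter_alt source_data column_name
instance (source_data : String) (column_name : String) (out : String × String) : Decidable (Spec_admin_update_data_source_add_secfilter source_data column_name out) := by unfold Spec_admin_update_data_source_add_secfilter; infer_instance

-- ===== CLAIM (what is proved, stated in full; the proofs are below) =====
def Claim_equal_admin_update_data_source_add_secfilter : Prop := ∀ (source_data : String) (column_name : String), Dom_admin_update_data_source_add_secfilter source_data column_name → Spec_admin_update_data_source_add_secfilter source_data column_name (admin_update_data_source_add_secfilter source_data column_name)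

-- ===== LEMMAS AND PROOFS =====
lemma pv_block_eq (t sep : List Char) (h : sep <:+: t) :
    (pvPartition t sep).1 ++ (pvPartition t sep).2.1 =
      t.take ((PySem.Chars.find t sep).toNat + sep.length) := by
  rw [pvPartition_of_infix t sep h]
  have h0 : 0 ≤ PySem.Chars.find t sep := (PySem.Chars.find_nonneg_iff t sep).mpr h
  have hp := (PySem.Chars.find_spec h0).1
  rw [List.take_add]
  congr 1
  exact List.prefix_iff_eq_take.mp hp
lemma pvLoopA_stop (xn acc rem : List Char) (fd : Bool)
    (h : PySem.Chars.isIn pvStartTag rem = false) : pvLoopA xn acc rem fd = (acc, fd) := by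
  rw [pvLoopA]; simp [h]
lemma pvLoopA_step (xn acc rem : List Char) (fd : Bool)
    (h : PySem.Chars.isIn pvStartTag rem = true) :
    pvLoopA xn acc rem fd =
      (if PySem.Chars.isIn xn
            ((pvPartition ((pvPartition rem pvStartTag).2.1 ++ (pvPartition rem pvStartTag).2.2) pvEndTag).1 ++
              (pvPartition ((pvPartition rem pvStartTag).2.1 ++ (pvPartition rem pvStartTag).2.2) pvEndTag).2.1) = true then
        (acc ++ (pvPartition rem pvStartTag).1 ++
          (((pvPartition ((pvPartition ((pvPartition rem pvStartTag).2.1 ++ (pvPartition rem pvStartTag).2.2) pvEndTag).1 ++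
              (pvPartition ((pvPartition rem pvStartTag).2.1 ++ (pvPartition rem pvStartTag).2.2) pvEndTag).2.1) pvAggTag).1 ++
            (pvPartition ((pvPartition ((pvPartition rem pvStartTag).2.1 ++ (pvPartition rem pvStartTag).2.2) pvEndTag).1 ++
              (pvPartition ((pvPartition rem pvStartTag).2.1 ++ (pvPartition rem pvStartTag).2.2) pvEndTag).2.1) pvAggTag).2.1 ++ pvTemplate) ++
            (pvPartition ((pvPartition ((pvPartition rem pvStartTag).2.1 ++ (pvPartition rem pvStartTag).2.2) pvEndTag).1 ++
              (pvPartition ((pvPartition rem pvStartTag).2.1 ++ (pvPartition rem pvStartTag).2.2) pvEndTag).2.1) pvAggTag).2.2) ++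
          (pvPartition ((pvPartition rem pvStartTag).2.1 ++ (pvPartition rem pvStartTag).2.2) pvEndTag).2.2, true)
      else
        pvLoopA xn (acc ++ (pvPartition rem pvStartTag).1 ++
          ((pvPartition ((pvPartition rem pvStartTag).2.1 ++ (pvPartition rem pvStartTag).2.2) pvEndTag).1 ++
            (pvPartition ((pvPartition rem pvStartTag).2.1 ++ (pvPartition rem pvStartTag).2.2) pvEndTag).2.1))
          ((pvPartition ((pvPartition rem pvStartTag).2.1 ++ (pvPartition rem pvStartTag).2.2) pvEndTag).2.2) fd) := by
  rw [pvLoopA]; simp only [dif_pos h]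
lemma pvLoopB_stop (src xn err : List Char) (pos : Nat)
    (hi : PySem.Chars.findFrom src pvStartTag (pos : Int) none = -1) :
    pvLoopB src xn err pos = (PySem.List.slice src none (some (pos : Int)), err) := by
  rw [pvLoopB]; simp only [dif_pos hi]
lemma pvLoopB_step (src xn err : List Char) (pos : Nat)
    (hi : PySem.Chars.findFrom src pvStartTag (pos : Int) none ≠ -1) :
    pvLoopB src xn err pos =
      (let i := PySem.Chars.findFrom src pvStartTag (pos : Int) none
       let j := PySem.Chars.findFrom src pvEndTag i none
       let blockEnd : Nat := if j = -1 then src.length else j.toNat + pvEndTag.length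
       let block := PySem.List.slice src (some i) (some (blockEnd : Int))
       if PySem.Chars.isIn xn block = true then
         let k := PySem.Chars.find block pvAggTag
         let p : Nat := if k = -1 then blockEnd else i.toNat + k.toNat + pvAggTag.length
         (PySem.List.slice src none (some (p : Int)) ++ pvTemplate ++ PySem.List.slice src (some (p : Int)) none, ([] : List Char))
       else pvLoopB src xn err blockEnd) := by
  rw [pvLoopB]; simp only [dif_neg hi]
lemma pv_match_val (src : List Char) (q m : Nat) (h2 : q ≤ m) (h3 : m ≤ src.length) :
    src.take (if PySem.Chars.find ((src.drop q).take (m - q)) pvAggTag = -1 then m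
              else q + (PySem.Chars.find ((src.drop q).take (m - q)) pvAggTag).toNat + pvAggTag.length)
      ++ pvTemplate ++
    src.drop (if PySem.Chars.find ((src.drop q).take (m - q)) pvAggTag = -1 then m
              else q + (PySem.Chars.find ((src.drop q).take (m - q)) pvAggTag).toNat + pvAggTag.length) =
    src.take q ++
      (((pvPartition ((src.drop q).take (m - q)) pvAggTag).1 ++
          (pvPartition ((src.drop q).take (m - q)) pvAggTag).2.1 ++ pvTemplate) ++
        (pvPartition ((src.drop q).take (m - q)) pvAggTag).2.2) ++
      src.drop m := by
  set block := (src.drop q).take (m - q) with hblock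
  by_cases hk : pvAggTag <:+: block
  · have hkne : PySem.Chars.find block pvAggTag ≠ -1 := (PySem.Chars.find_ne_neg_one_iff _ _).mpr hk
    rw [pv_block_eq block pvAggTag hk, pvPartition_of_infix block pvAggTag hk]
    simp only [if_neg hkne]
    set kn := (PySem.Chars.find block pvAggTag).toNat with hkn
    set d := pvAggTag.length with hd
    have hklen : kn + d ≤ block.length := pv_find_add_le block pvAggTag hk
    have hblen : block.length = m - q := by
      rw [hblock, List.length_take, List.length_drop]; omega
    set p := q + kn + d with hp
    have hB : src.take q ++ block.take (kn + d) = src.take p := by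
      rw [hblock, List.take_take, min_eq_left (by omega), ← List.take_add,
        show q + (kn + d) = p from by omega]
    have hC : block.drop (kn + d) ++ src.drop m = src.drop p := by
      rw [hblock, List.drop_take, List.drop_drop, show q + (kn + d) = p from by omega]
      have e2 : m - q - (kn + d) = m - p := by omega
      rw [e2]
      have e3 : src.drop m = (src.drop p).drop (m - p) := by rw [List.drop_drop]; congr 1; omega
      rw [e3, List.take_append_drop]
    rw [← hB, ← hC]
    simp [List.append_assoc]
  · have hkeq : PySem.Chars.find block pvAggTag = -1 := (PySem.Chars.find_eq_neg_one_iff _ _).mpr hk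
    rw [pvPartition_of_not_infix block pvAggTag hk]
    simp only [if_pos hkeq, List.append_nil]
    have hB : src.take q ++ block = src.take m := by
      rw [hblock, ← List.take_add]; congr 1; omega
    rw [← hB]
    simp [List.append_assoc]
lemma pv_loop_eq (src xn err : List Char) : ∀ (pos : Nat), pos ≤ src.length →
    pvLoopB src xn err pos =
      ((pvLoopA xn (src.take pos) (src.drop pos) false).1,
        if (pvLoopA xn (src.take pos) (src.drop pos) false).2 = true then [] else err) := by
  suffices H : ∀ (n : Nat) (pos : Nat), src.length - pos = n → pos ≤ src.length →
      pvLoopB src xn err pos =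
        ((pvLoopA xn (src.take pos) (src.drop pos) false).1,
          if (pvLoopA xn (src.take pos) (src.drop pos) false).2 = true then [] else err) by
    intro pos hpos; exact H _ pos rfl hpos
  intro n
  induction n using Nat.strong_induction_on with
  | _ n IH =>
  intro pos hn hpos
  by_cases hi : PySem.Chars.findFrom src pvStartTag (pos : Int) none = -1
  · -- no further StagingColumn block
    have hninf : ¬ pvStartTag <:+: src.drop pos :=
      (PySem.Chars.findFrom_natCast_eq_neg_one_iff src pvStartTag pos hpos).mp hi
    have hisin : PySem.Chars.isIn pvStartTag (src.drop pos) = false := by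
      rw [← Bool.not_eq_true, PySem.Chars.isIn_iff_infix]; exact hninf
    rw [pvLoopB_stop src xn err pos hi, pvLoopA_stop xn _ _ false hisin]
    simp [PySem.List.slice_to_natCast]
  · -- a StagingColumn block exists
    have hF := PySem.Chars.findFrom_natCast src pvStartTag pos hpos
    set f := PySem.Chars.find (src.drop pos) pvStartTag with hfdef
    have hf : f ≠ -1 := by
      intro h0; apply hi; rw [hF, if_pos h0]
    have hf0 : 0 ≤ f := by
      have := PySem.Chars.neg_one_le_find (src.drop pos) pvStartTag; omega
    have hinf : pvStartTag <:+: src.drop pos := (PySem.Chars.find_ne_neg_one_iff _ _).mp hf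
    have hisin : PySem.Chars.isIn pvStartTag (src.drop pos) = true :=
      (PySem.Chars.isIn_iff_infix _ _).mpr hinf
    set q := pos + f.toNat with hq
    have hiq : PySem.Chars.findFrom src pvStartTag (pos : Int) none = (q : Int) := by
      rw [hF, if_neg hf, hq]; push_cast; omega
    have hq1 : q + pvStartTag.length ≤ src.length := by
      have := pv_find_add_le (src.drop pos) pvStartTag hinf
      simp only [List.length_drop] at this
      omega
    have hSpos := pvStartTag_pos
    have hqle : q ≤ src.length := by omega
    -- A's first partition
    have hprev : (pvPartition (src.drop pos) pvStartTag).1 = (src.drop pos).take f.toNat := by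
      rw [pvPartition_of_infix _ _ hinf]
    have hbeg : (pvPartition (src.drop pos) pvStartTag).2.1 ++ (pvPartition (src.drop pos) pvStartTag).2.2
        = src.drop q := by
      rw [pv_begin_eq _ _ hinf, List.drop_drop, hq, Nat.add_comm]
    -- B's end-tag search at absolute q = A's at the beginc suffix
    have hjF := PySem.Chars.findFrom_natCast src pvEndTag q hqle
    set g := PySem.Chars.find (src.drop q) pvEndTag with hgdef
    rw [pvLoopB_step src xn err pos hi]
    simp only [hiq, hjF]
    rw [pvLoopA_step xn _ _ false hisin]
    rw [hbeg, hprev]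
    by_cases hg : g = -1
    · -- no closing tag: the block runs to the end of the string
      have hgninf : ¬ pvEndTag <:+: src.drop q := (PySem.Chars.find_eq_neg_one_iff _ _).mp hg
      have hblockA : (pvPartition (src.drop q) pvEndTag).1 ++ (pvPartition (src.drop q) pvEndTag).2.1
          = (src.drop q).take (src.length - q) := by
        rw [pvPartition_of_not_infix _ _ hgninf]
        simp only [List.append_nil]
        rw [List.take_of_length_le (by simp)]
      have hrem2 : (pvPartition (src.drop q) pvEndTag).2.2 = src.drop src.length := by
        rw [pvPartition_of_not_infix _ _ hgninf, List.drop_length]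
      rw [hblockA, hrem2]
      simp only [hg, reduceIte]
      rw [PySem.List.slice_natCast]
      by_cases hx : PySem.Chars.isIn xn ((src.drop q).take (src.length - q)) = true
      · simp only [if_pos hx]
        rw [Prod.mk.injEq]
        refine ⟨?_, rfl⟩
        simp only [Int.toNat_natCast, PySem.List.slice_to_natCast, PySem.List.slice_from_natCast]
        rw [← List.take_add, ← hq]
        exact pv_match_val src q src.length (by omega) (by omega)
      · simp only [if_neg hx]
        have hacc : src.take pos ++ (src.drop pos).take f.toNat ++ (src.drop q).take (src.length - q)
            = src.take src.length := by
          rw [← List.take_add, ← hq, ← List.take_add]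
          congr 1; omega
        rw [hacc]
        have hlt : pos < src.length := by omega
        rw [IH (src.length - src.length) (by omega) src.length (by omega) (by omega)]
    · -- a closing tag exists: the block ends right after it
      have hEinf : pvEndTag <:+: src.drop q := (PySem.Chars.find_ne_neg_one_iff _ _).mp hg
      have hg0 : 0 ≤ g := by
        have := PySem.Chars.neg_one_le_find (src.drop q) pvEndTag; omega
      have hqg : ¬((q : Int) + g = -1) := by omega
      have hglen : g.toNat + pvEndTag.length ≤ src.length - q := by
        have := pv_find_add_le (src.drop q) pvEndTag hEinf
        simp only [List.length_drop] at this
        omega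
      have hEpos := pvEndTag_pos
      have ht : ((q : Int) + g).toNat = q + g.toNat := by omega
      simp only [if_neg hg, if_neg hqg, ht]
      set m := q + g.toNat + pvEndTag.length with hm
      have hblockA : (pvPartition (src.drop q) pvEndTag).1 ++ (pvPartition (src.drop q) pvEndTag).2.1
          = (src.drop q).take (m - q) := by
        rw [pv_block_eq _ _ hEinf, ← hgdef, show g.toNat + pvEndTag.length = m - q from by omega]
      have hrem2 : (pvPartition (src.drop q) pvEndTag).2.2 = src.drop m := by
        rw [pvPartition_of_infix _ _ hEinf, ← hgdef, List.drop_drop,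
          show q + (g.toNat + pvEndTag.length) = m from by omega]
      rw [hblockA, hrem2, PySem.List.slice_natCast]
      by_cases hx : PySem.Chars.isIn xn ((src.drop q).take (m - q)) = true
      · simp only [if_pos hx]
        rw [Prod.mk.injEq]
        refine ⟨?_, rfl⟩
        simp only [Int.toNat_natCast, PySem.List.slice_to_natCast, PySem.List.slice_from_natCast]
        rw [← List.take_add, ← hq]
        exact pv_match_val src q m (by omega) (by omega)
      · simp only [if_neg hx]
        have hacc : src.take pos ++ (src.drop pos).take f.toNat ++ (src.drop q).take (m - q)
            = src.take m := by
          rw [← List.take_add, ← hq, ← List.take_add]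
          congr 1; omega
        rw [hacc]
        rw [IH (src.length - m) (by omega) m (by omega) (by omega)]

-- ===== VERDICT (by name: the statement is the Claim_ definition above) =====
theorem admin_update_data_source_add_secfilter_spec : Claim_equal_admin_update_data_source_add_secfilter := by
  intro source_data column_name _
  unfold Spec_admin_update_data_source_add_secfilter
  unfold admin_update_data_source_add_secfilter admin_update_data_source_add_secfilter_alt
  rw [pv_loop_eq source_data.toList (pvXmlName column_name) (pvErrMsg column_name) 0 (Nat.zero_le _)]
  simp only [List.take_zero, List.drop_zero]
  rfl
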